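-- pv_equiv track=rewrite | github.com/miruthula-05/draw2learn | media_pipeline.py | _character_kind
-- ===== SOURCE A (Python) =====
-- def _character_kind(object_name: str) -> str:
--     lowered = object_name.lower()
--     if any(token in lowered for token in ("dog", "puppy", "moti")):
--         return "dog"
--     if any(token in lowered for token in ("cat", "rabbit", "lion", "tiger", "fox", "frog", "owl", "cow", "elephant", "monkey")):
--         return "animal"
--     if any(token in lowered for token in ("neighbour", "neighbor", "friends", "students")):
--         return "group"
--     if any(token in lowered for token in ("mother", "father", "maa", "mom", "mummy", "mum", "teacher", "king", "queen")):
--         return "adult"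
--     if any(token in lowered for token in ("boy", "girl", "badal", "child", "student", "prince", "princess")):
--         return "child"
--     if any(token in lowered for token in ("circle", "square", "triangle", "rectangle", "star")):
--         return "shape"
--     return "child"
-- ===== SOURCE B (Python) =====
-- _TOKEN_KIND = {
--     "dog": "dog", "puppy": "dog", "moti": "dog",
--     "cat": "animal", "rabbit": "animal", "lion": "animal", "tiger": "animal",
--     "fox": "animal", "frog": "animal", "owl": "animal", "cow": "animal",
--     "elephant": "animal", "monkey": "animal",
--     "neighbour": "group", "neighbor": "group", "friends": "group", "students": "group",
--     "mother": "adult", "father": "adult", "maa": "adult", "mom": "adult",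
--     "mummy": "adult", "mum": "adult", "teacher": "adult", "king": "adult", "queen": "adult",
--     "boy": "child", "girl": "child", "badal": "child", "child": "child",
--     "student": "child", "prince": "child", "princess": "child",
--     "circle": "shape", "square": "shape", "triangle": "shape",
--     "rectangle": "shape", "star": "shape",
-- }
--
-- _PRIORITY = {"dog": 0, "animal": 1, "group": 2, "adult": 3, "child": 4, "shape": 5}
--
--
-- def _character_kind(object_name: str) -> str:
--     lowered = object_name.lower()
--     best = None
--     for token, kind in _TOKEN_KIND.items():
--         if token in lowered and (best is None or _PRIORITY[kind] < _PRIORITY[best]):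
--             best = kind
--     return best if best is not None else "child"
-- ===== Notes on version B (the rewrite author's own statement) =====
-- stated objective: alternative
-- what changed: Replaced the ordered if-chain with early returns by a single full pass over a flat token-to-kind dictionary that keeps the minimum-priority matching kind, selecting the winner by a numeric priority map instead of by control flow.
import Mathlib
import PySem

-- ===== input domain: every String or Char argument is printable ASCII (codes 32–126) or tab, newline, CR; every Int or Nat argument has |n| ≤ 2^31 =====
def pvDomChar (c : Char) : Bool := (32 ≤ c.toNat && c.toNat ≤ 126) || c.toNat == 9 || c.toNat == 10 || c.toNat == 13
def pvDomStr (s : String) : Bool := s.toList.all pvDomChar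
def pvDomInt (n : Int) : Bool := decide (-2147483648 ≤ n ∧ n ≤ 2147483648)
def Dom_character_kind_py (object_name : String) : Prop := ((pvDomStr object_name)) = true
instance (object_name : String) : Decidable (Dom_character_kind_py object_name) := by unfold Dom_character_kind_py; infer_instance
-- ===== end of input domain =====

-- B replaces A's early-return if-chain by a full pass over a flat token→kind map keeping the minimum-priority match (alternative; same cost).

-- ===== PORT A =====
def character_kind_py (object_name : String) : String :=
  let lowered := PySem.Str.lower object_name
  if (["dog", "puppy", "moti"] : List String).any (fun token => PySem.Str.isIn token lowered) then "dog"
  else if (["cat", "rabbit", "lion", "tiger", "fox", "frog", "owl", "cow", "elephant", "monkey"] : List String).any (fun token => PySem.Str.isIn token lowered) then "animal"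
  else if (["neighbour", "neighbor", "friends", "students"] : List String).any (fun token => PySem.Str.isIn token lowered) then "group"
  else if (["mother", "father", "maa", "mom", "mummy", "mum", "teacher", "king", "queen"] : List String).any (fun token => PySem.Str.isIn token lowered) then "adult"
  else if (["boy", "girl", "badal", "child", "student", "prince", "princess"] : List String).any (fun token => PySem.Str.isIn token lowered) then "child"
  else if (["circle", "square", "triangle", "rectangle", "star"] : List String).any (fun token => PySem.Str.isIn token lowered) then "shape"
  else "child"

-- ===== PORT B =====
-- _TOKEN_KIND: the flat token→kind dict, in Python insertion (iteration) order
def pvTokenKind : List (String × String) :=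
  [("dog", "dog"), ("puppy", "dog"), ("moti", "dog"),
   ("cat", "animal"), ("rabbit", "animal"), ("lion", "animal"), ("tiger", "animal"),
   ("fox", "animal"), ("frog", "animal"), ("owl", "animal"), ("cow", "animal"),
   ("elephant", "animal"), ("monkey", "animal"),
   ("neighbour", "group"), ("neighbor", "group"), ("friends", "group"), ("students", "group"),
   ("mother", "adult"), ("father", "adult"), ("maa", "adult"), ("mom", "adult"),
   ("mummy", "adult"), ("mum", "adult"), ("teacher", "adult"), ("king", "adult"), ("queen", "adult"),
   ("boy", "child"), ("girl", "child"), ("badal", "child"), ("child", "child"),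
   ("student", "child"), ("prince", "child"), ("princess", "child"),
   ("circle", "shape"), ("square", "shape"), ("triangle", "shape"),
   ("rectangle", "shape"), ("star", "shape")]

-- _PRIORITY lookup (total on the six kinds that occur; matches the Python dict)
def pvPrio : String → Nat
  | "dog" => 0
  | "animal" => 1
  | "group" => 2
  | "adult" => 3
  | "child" => 4
  | "shape" => 5
  | _ => 6

-- loop body: if token in lowered and (best is None or prio[kind] < prio[best]): best = kind
def pvStep (lowered : String) (best : Option String) (e : String × String) : Option String :=
  if PySem.Str.isIn e.1 lowered then
    match best with
    | none => some e.2
    | some b => if pvPrio e.2 < pvPrio b then some e.2 else some b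
  else best

def character_kind_py_alt (object_name : String) : String :=
  let lowered := PySem.Str.lower object_name
  let best := pvTokenKind.foldl (pvStep lowered) none
  match best with
  | some b => b
  | none => "child"

-- ===== PRECONDITION & SPEC =====
def Spec_character_kind_py (object_name : String) (out : String) : Prop := out = character_kind_py_alt object_name
instance (object_name : String) (out : String) : Decidable (Spec_character_kind_py object_name out) := by unfold Spec_character_kind_py; infer_instance

-- ===== CLAIM (what is proved, stated in full; the proofs are below) =====
def Claim_equal_character_kind_py : Prop := ∀ (object_name : String), Dom_character_kind_py object_name → Spec_character_kind_py object_name (character_kind_py object_name)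

-- ===== LEMMAS AND PROOFS =====

-- once best is set to a kind at least as good as k, a whole group of k-tokens leaves it unchanged
theorem pvSkip (l : String) (ts : List String) (k b : String) (h : pvPrio b ≤ pvPrio k) :
    List.foldl (pvStep l) (some b) (ts.map (fun t => (t, k))) = some b := by
  induction ts with
  | nil => rfl
  | cons t ts ih =>
      simp only [List.map_cons, List.foldl_cons, pvStep]
      split_ifs with h1 h2
      · omega
      · exact ih
      · exact ih

-- starting from none, a group of k-tokens either sets best to k (if any hit) or leaves it none
theorem pvNoneGroup (l : String) (ts : List String) (k : String) (rest : List (String × String)) :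
    List.foldl (pvStep l) none (ts.map (fun t => (t, k)) ++ rest)
      = if ts.any (fun t => PySem.Str.isIn t l) then List.foldl (pvStep l) (some k) rest
        else List.foldl (pvStep l) none rest := by
  induction ts with
  | nil => simp
  | cons t ts ih =>
      simp only [List.map_cons, List.cons_append, List.foldl_cons, List.any_cons]
      by_cases h : PySem.Str.isIn t l
      · have hstep : pvStep l none (t, k) = some k := by
          simp only [pvStep, h]; rfl
        rw [hstep, List.foldl_append, pvSkip l ts k k (le_refl _),
            if_pos (by simp only [h, Bool.true_or])]
      · have hb : PySem.Str.isIn t l = false := by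
          revert h; cases PySem.Str.isIn t l <;> simp
        have hstep : pvStep l none (t, k) = none := by
          simp only [pvStep, hb]; rfl
        rw [hstep, ih]; simp only [hb, Bool.false_or]

-- the group lemma without a tail
theorem pvNoneGroup0 (l : String) (ts : List String) (k : String) :
    List.foldl (pvStep l) none (ts.map (fun t => (t, k)))
      = if ts.any (fun t => PySem.Str.isIn t l) then some k else none := by
  have h := pvNoneGroup l ts k []
  rw [List.append_nil] at h
  simpa only [List.foldl_nil] using h

-- the flat dict is the six groups in priority order
theorem pvTokenKind_groups :
    pvTokenKind =
      (["dog", "puppy", "moti"].map (fun t => (t, "dog")))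
      ++ (["cat", "rabbit", "lion", "tiger", "fox", "frog", "owl", "cow", "elephant", "monkey"].map (fun t => (t, "animal")))
      ++ (["neighbour", "neighbor", "friends", "students"].map (fun t => (t, "group")))
      ++ (["mother", "father", "maa", "mom", "mummy", "mum", "teacher", "king", "queen"].map (fun t => (t, "adult")))
      ++ (["boy", "girl", "badal", "child", "student", "prince", "princess"].map (fun t => (t, "child")))
      ++ (["circle", "square", "triangle", "rectangle", "star"].map (fun t => (t, "shape"))) := by
  rfl

-- ===== VERDICT (by name: the statement is the Claim_ definition above) =====
theorem character_kind_py_spec : Claim_equal_character_kind_py := by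
  intro s _
  unfold Spec_character_kind_py character_kind_py character_kind_py_alt
  rw [pvTokenKind_groups]
  set l := PySem.Str.lower s with hl
  simp only [List.append_assoc]
  rw [pvNoneGroup]
  by_cases h1 : (["dog", "puppy", "moti"] : List String).any (fun t => PySem.Str.isIn t l)
  · rw [if_pos h1, if_pos h1, List.foldl_append, pvSkip _ _ _ _ (by decide),
        List.foldl_append, pvSkip _ _ _ _ (by decide), List.foldl_append,
        pvSkip _ _ _ _ (by decide), List.foldl_append, pvSkip _ _ _ _ (by decide),
        pvSkip _ _ _ _ (by decide)]
  · rw [if_neg h1, if_neg h1, pvNoneGroup]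
    by_cases h2 : (["cat", "rabbit", "lion", "tiger", "fox", "frog", "owl", "cow", "elephant", "monkey"] : List String).any (fun t => PySem.Str.isIn t l)
    · rw [if_pos h2, if_pos h2, List.foldl_append, pvSkip _ _ _ _ (by decide),
          List.foldl_append, pvSkip _ _ _ _ (by decide), List.foldl_append,
          pvSkip _ _ _ _ (by decide), pvSkip _ _ _ _ (by decide)]
    · rw [if_neg h2, if_neg h2, pvNoneGroup]
      by_cases h3 : (["neighbour", "neighbor", "friends", "students"] : List String).any (fun t => PySem.Str.isIn t l)
      · rw [if_pos h3, if_pos h3, List.foldl_append, pvSkip _ _ _ _ (by decide),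
            List.foldl_append, pvSkip _ _ _ _ (by decide), pvSkip _ _ _ _ (by decide)]
      · rw [if_neg h3, if_neg h3, pvNoneGroup]
        by_cases h4 : (["mother", "father", "maa", "mom", "mummy", "mum", "teacher", "king", "queen"] : List String).any (fun t => PySem.Str.isIn t l)
        · rw [if_pos h4, if_pos h4, List.foldl_append, pvSkip _ _ _ _ (by decide),
              pvSkip _ _ _ _ (by decide)]
        · rw [if_neg h4, if_neg h4, pvNoneGroup]
          by_cases h5 : (["boy", "girl", "badal", "child", "student", "prince", "princess"] : List String).any (fun t => PySem.Str.isIn t l)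
          · rw [if_pos h5, if_pos h5, pvSkip _ _ _ _ (by decide)]
          · rw [if_neg h5, if_neg h5, pvNoneGroup0]
            by_cases h6 : (["circle", "square", "triangle", "rectangle", "star"] : List String).any (fun t => PySem.Str.isIn t l)
            · rw [if_pos h6, if_pos h6]
            · rw [if_neg h6, if_neg h6]
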